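-- pv_equiv track=rewrite | github.com/Bobcatsoap/jy-server | cell/RoomType6InitiativeCardSplit.py | find_3_l_d
-- ===== SOURCE A (Python) =====
-- def find_3_l_d(cards):
--     """
--     找三连对（飞机不带翅膀）
--     :param cards:
--     :return:
--     """
--     _3 = []
--     _3_l_d_s = []
--     cards = cards.copy()
--     for i in cards:
--         if cards.count(i) >= 3:
--             if i not in _3:
--                 _3.append(i)
--     _3.sort()
--
--     for i in _3:
--         num = i
--         _3_l_d = []
--         while num in _3 and num < 15:
--             _3_l_d.append(num)
--             num += 1
--
--         if len(_3_l_d) >= 2: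
--             _3_l_d_s.append(_3_l_d)
--
--     t = []
--     if _3_l_d_s:
--         _3_l_d_s.sort(key=lambda x: len(x), reverse=True)
--         t = _3_l_d_s[0] * 3
--         t.sort()
--     return [t]
-- ===== SOURCE B (Python) =====
-- def find_3_l_d(cards):
--     """
--     找三连对（飞机不带翅膀）— one counting pass + single scan over the sorted
--     distinct triple-able values for the longest consecutive run (first one on ties).
--     """
--     counts = {}
--     for c in cards:
--         counts[c] = counts.get(c, 0) + 1
--     vals = sorted(v for v in counts if counts[v] >= 3 and v < 15)
--     best = []
--     cur = []
--     for v in vals: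
--         if not cur or cur[-1] + 1 == v:
--             cur = cur + [v]
--         else:
--             cur = [v]
--         if len(cur) >= 2 and len(cur) > len(best):
--             best = cur
--     return [[x for x in best for _ in range(3)]]
-- ===== Notes on version B (the rewrite author's own statement) =====
-- stated objective: faster
-- what changed: Replaces the quadratic count-inside-loop dedup and the per-start while-loop run expansion plus length-sort with a single dict counting pass, one sort of the qualifying distinct values, and one linear scan that keeps the first longest consecutive run.
import Mathlib
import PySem

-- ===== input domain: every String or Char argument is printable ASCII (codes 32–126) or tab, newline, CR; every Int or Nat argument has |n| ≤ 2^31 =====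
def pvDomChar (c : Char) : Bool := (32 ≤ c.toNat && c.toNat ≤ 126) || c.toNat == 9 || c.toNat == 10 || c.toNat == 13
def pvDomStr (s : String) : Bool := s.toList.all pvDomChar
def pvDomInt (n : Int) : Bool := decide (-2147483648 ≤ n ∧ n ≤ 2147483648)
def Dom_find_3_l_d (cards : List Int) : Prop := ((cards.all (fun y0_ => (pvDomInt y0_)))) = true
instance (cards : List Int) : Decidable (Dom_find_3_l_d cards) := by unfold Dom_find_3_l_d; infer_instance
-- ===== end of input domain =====

-- B replaces A's quadratic count-inside-loop dedup and per-start while-loop run building (plus a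
-- length-sort of all runs) by one dict counting pass, one sort of the qualifying distinct values,
-- and a single linear scan keeping the first longest consecutive run; return values are identical.

-- ===== PORT A =====

-- 'while num in _3 and num < 15: _3_l_d.append(num); num += 1'
def pvChain (s : List Int) (num : Int) : List Int :=
  if h : num ∈ s ∧ num < 15 then num :: pvChain s (num + 1) else []
termination_by (15 - num).toNat
decreasing_by omega

def find_3_l_d (cards : List Int) : List (List Int) :=
  -- cards = cards.copy() : same list value, iteration and counting happen over it
  let t3 := cards.foldl
    (fun acc i => if 3 ≤ PySem.List.count cards i ∧ i ∉ acc then acc ++ [i] else acc) []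
  let t3s := PySem.List.sorted t3 (fun x => x) false
  let runs := t3s.foldl
    (fun acc i =>
      let r := pvChain t3s i
      if 2 ≤ r.length then acc ++ [r] else acc) []
  if runs = [] then [([] : List Int)]
  else
    let runsSorted := PySem.List.sorted runs (fun x => x.length) true
    -- _3_l_d_s[0] is guarded by the 'if _3_l_d_s:' branch, so the index is always in range
    let t := PySem.List.pyRepeat ((PySem.List.pyGet? runsSorted 0).getD []) 3
    [PySem.List.sorted t (fun x => x) false]

-- ===== PORT B =====

-- the body of Source B's scan loop
def pvStepB (st : List Int × List Int) (v : Int) : List Int × List Int :=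
  let cur := if st.2 = [] then st.2 ++ [v]
             else if (PySem.List.pyGet? st.2 (-1)).getD 0 + 1 = v then st.2 ++ [v]
             else [v]
  ((if 2 ≤ cur.length ∧ st.1.length < cur.length then cur else st.1), cur)

def find_3_l_d_alt (cards : List Int) : List (List Int) :=
  let counts := cards.foldl (fun d c => d.modify c 0 (fun x => x + 1)) (PySem.Dict.empty : PySem.Dict Int Int)
  -- counts[v] in Source B is always present (v iterates over counts); getD 0 returns the same value
  let vals := PySem.List.sorted
    ((PySem.Dict.keys counts).filter
      (fun v => decide (3 ≤ counts.getD v 0) && decide (v < 15))) (fun x => x) false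
  let p := vals.foldl pvStepB ([], [])
  [p.1.flatMap (fun x => [x, x, x])]

-- ===== PRECONDITION & SPEC =====
def Spec_find_3_l_d (cards : List Int) (out : List (List Int)) : Prop := out = find_3_l_d_alt cards
instance (cards : List Int) (out : List (List Int)) : Decidable (Spec_find_3_l_d cards out) := by unfold Spec_find_3_l_d; infer_instance

-- ===== CLAIM (what is proved, stated in full; the proofs are below) =====
def Claim_equal_find_3_l_d : Prop := ∀ (cards : List Int), Dom_find_3_l_d cards → Spec_find_3_l_d cards (find_3_l_d cards)

-- ===== LEMMAS AND PROOFS =====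

-- proof-only helpers --------------------------------------------------------

-- the step of A's best-run selection, with the ≥2-length gate built in
def pvStepA (b r : List Int) : List Int := if 2 ≤ r.length ∧ b.length < r.length then r else b

-- a maximal consecutive block, given by start and length
def pvBlock (p : Int × Nat) : List Int := (List.range p.2).map (fun (j : Nat) => p.1 + (j : Int))

-- a well-formed block decomposition: nonempty blocks, all values < 15, gaps between blocks
def pvGood (bs : List (Int × Nat)) : Prop :=
  (∀ p ∈ bs, 1 ≤ p.2 ∧ p.1 + (p.2 : Int) ≤ 15) ∧
  bs.Pairwise (fun p q => p.1 + (p.2 : Int) < q.1)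

-- block decomposition of a strictly increasing list
def pvGrp : List Int → List (Int × Nat)
  | [] => []
  | v :: vs =>
    match pvGrp vs with
    | [] => [(v, 1)]
    | (s, k) :: bs => if s = v + 1 then (v, k + 1) :: bs else (v, 1) :: (s, k) :: bs

-- the common value both programs compute: first longest block of length ≥ 2
def pvBStep (b : List Int) (p : Int × Nat) : List Int :=
  if 2 ≤ p.2 ∧ b.length < p.2 then pvBlock p else b

def pvBFold (bs : List (Int × Nat)) : List Int := bs.foldl pvBStep []

-- basic block facts ---------------------------------------------------------

theorem pvBlock_length (p : Int × Nat) : (pvBlock p).length = p.2 := by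
  simp [pvBlock]

theorem pvBlock_cons (s : Int) (k : Nat) (hk : 1 ≤ k) :
    pvBlock (s, k) = s :: pvBlock (s + 1, k - 1) := by
  cases k with
  | zero => omega
  | succ k' =>
    simp only [pvBlock, Nat.add_sub_cancel]
    rw [List.range_succ_eq_map, List.map_cons, List.map_map]
    congr 1
    · simp
    · refine List.map_congr_left (fun j _ => ?_)
      simp only [Function.comp_apply, Nat.succ_eq_add_one]
      push_cast; ring

theorem pvBlock_mem (p : Int × Nat) (x : Int) :
    x ∈ pvBlock p ↔ p.1 ≤ x ∧ x < p.1 + p.2 := by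
  simp only [pvBlock, List.mem_map, List.mem_range]
  constructor
  · rintro ⟨j, hj, rfl⟩
    constructor
    · omega
    · have : (j : Int) < (p.2 : Int) := by exact_mod_cast hj
      omega
  · rintro ⟨h1, h2⟩
    refine ⟨(x - p.1).toNat, ?_, ?_⟩
    · omega
    · omega

theorem pvBlock_getLast? (s : Int) (k : Nat) (hk : 1 ≤ k) :
    (pvBlock (s, k)).getLast? = some (s + ((k : Int) - 1)) := by
  rw [List.getLast?_eq_getElem?]
  have hl : (pvBlock (s, k)).length = k := pvBlock_length (s, k)
  rw [hl, List.getElem?_eq_getElem (by omega)]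
  simp only [pvBlock, List.getElem_map, List.getElem_range]
  congr 1
  omega


theorem pvBlock_pairwise (p : Int × Nat) : (pvBlock p).Pairwise (· < ·) := by
  simp only [pvBlock]
  refine List.Pairwise.map (R := fun (a b : Nat) => a < b) _ ?_ List.pairwise_lt_range
  intro a b h
  omega


theorem pairwise_mem_cases {α : Type} {R : α → α → Prop} {l : List α} (h : l.Pairwise R)
    {a b : α} (ha : a ∈ l) (hb : b ∈ l) : a = b ∨ R a b ∨ R b a := by
  induction l with
  | nil =>exact absurd ha (List.not_mem_nil)
  | cons x xs ih =>
    rcases List.mem_cons.1 ha with rfl | ha' <;> rcases List.mem_cons.1 hb with rfl | hb'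
    · exact Or.inl rfl
    · exact Or.inr (Or.inl ((List.pairwise_cons.1 h).1 _ hb'))
    · exact Or.inr (Or.inr ((List.pairwise_cons.1 h).1 _ ha'))
    · exact ih (List.pairwise_cons.1 h).2 ha' hb'

-- pvChain facts -------------------------------------------------------------

theorem pvChain_neg {s : List Int} {num : Int} (h : ¬(num ∈ s ∧ num < 15)) :
    pvChain s num = [] := by
  rw [pvChain]; simp [h]

theorem pvChain_pos {s : List Int} {num : Int} (h1 : num ∈ s) (h2 : num < 15) :
    pvChain s num = num :: pvChain s (num + 1) := by
  rw [pvChain]; simp [h1, h2]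

theorem pvChain_congr (s s' : List Int) (h : ∀ x, (x ∈ s ∧ x < 15) ↔ (x ∈ s' ∧ x < 15)) :
    ∀ num, pvChain s num = pvChain s' num := by
  intro num
  by_cases h15 : num < 15
  · generalize hfuel : (15 - num).toNat = fuel
    induction fuel using Nat.strong_induction_on generalizing num with
    | _ fuel ih =>
      by_cases hm : num ∈ s ∧ num < 15
      · have hm' := (h num).1 hm
        rw [pvChain_pos hm.1 hm.2, pvChain_pos hm'.1 hm'.2]
        by_cases h15' : num + 1 < 15
        · have hlt : (15 - (num + 1)).toNat < fuel := by omega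
          rw [ih _ hlt _ h15' rfl]
        · rw [pvChain_neg (by omega), pvChain_neg (by omega)]
      · have hm' : ¬(num ∈ s' ∧ num < 15) := fun c => hm ((h num).2 c)
        rw [pvChain_neg hm, pvChain_neg hm']
  · rw [pvChain_neg (by omega), pvChain_neg (by omega)]


theorem pvChain_block {bs : List (Int × Nat)} (hg : pvGood bs) :
    ∀ {p : Int × Nat}, p ∈ bs → ∀ j : Nat, j < p.2 →
      pvChain (bs.flatMap pvBlock) (p.1 + (j : Int)) = pvBlock (p.1 + (j : Int), p.2 - j) := by
  intro p hp j hj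
  generalize hd : p.2 - j = d
  induction d using Nat.strong_induction_on generalizing j with
  | _ d ih =>
    have hc2 : (j : Int) < (p.2 : Int) := by exact_mod_cast hj
    have hb := (hg.1 p hp).2
    have hmem : p.1 + (j : Int) ∈ bs.flatMap pvBlock :=
      List.mem_flatMap.2 ⟨p, hp, (pvBlock_mem p _).2 ⟨by omega, by omega⟩⟩
    have h15 : p.1 + (j : Int) < 15 := by omega
    rw [pvChain_pos hmem h15, ← hd]
    by_cases hlast : j + 1 < p.2
    · have hcast : p.1 + (j : Int) + 1 = p.1 + ((j + 1 : Nat) : Int) := by push_cast; ring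
      have e : (p.1 + ((j + 1 : Nat) : Int), p.2 - (j + 1)) = (p.1 + (j : Int) + 1, p.2 - j - 1) := by
        rw [Prod.mk.injEq]
        exact ⟨by push_cast; ring, by omega⟩
      rw [hcast, ih (p.2 - (j + 1)) (by omega) (j + 1) hlast rfl, e,
          pvBlock_cons (p.1 + (j : Int)) (p.2 - j) (by omega)]
    · have hnot : p.1 + (j : Int) + 1 ∉ bs.flatMap pvBlock := by
        intro hmem'
        obtain ⟨q, hq, hin⟩ := List.mem_flatMap.1 hmem'
        have hqin := (pvBlock_mem q _).1 hin
        have hj1 : j + 1 = p.2 := by omega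
        have hx : p.1 + (j : Int) + 1 = p.1 + (p.2 : Int) := by
          have : ((j : Int) + 1) = ((p.2 : Nat) : Int) := by exact_mod_cast congrArg (Nat.cast (R := Int)) hj1
          omega
        rcases pairwise_mem_cases hg.2 hp hq with rfl | hR | hR
        · omega
        · omega
        · have hq1 := (hg.1 q hq).1
          have : (1 : Int) ≤ (q.2 : Int) := by exact_mod_cast hq1
          omega
      rw [pvChain_neg (fun c => hnot c.1)]
      have h1 : p.2 - j = 1 := by omega
      rw [h1]
      simp [pvBlock]


-- grp facts ------------------------------------------------------------------

theorem pvGrp_spec : ∀ (vs : List Int), vs.Pairwise (· < ·) → (∀ x ∈ vs, x < 15) →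
    (pvGrp vs).flatMap pvBlock = vs ∧ pvGood (pvGrp vs) := by
  intro vs hpw h15
  induction vs with
  | nil => simp [pvGrp, pvGood]
  | cons v vs ih =>
    have hvlt : ∀ y ∈ vs, v < y := (List.pairwise_cons.1 hpw).1
    obtain ⟨hflat, hgood⟩ := ih (List.pairwise_cons.1 hpw).2 (fun x hx => h15 x (List.mem_cons_of_mem _ hx))
    have hv15 : v < 15 := h15 v List.mem_cons_self
    cases hg : pvGrp vs with
    | nil =>
      rw [hg] at hflat
      have hvs' : vs = [] := by rw [← hflat]; simp
      subst hvs'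
      have hgrp : pvGrp [v] = [(v, 1)] := by simp [pvGrp]
      rw [hgrp]
      refine ⟨by simp [pvBlock], ?_, ?_⟩
      · intro q hq
        simp at hq
        subst hq
        exact ⟨le_refl 1, by push_cast; omega⟩
      · simp
    | cons hd bs =>
      obtain ⟨s, k⟩ := hd
      rw [hg] at hflat hgood
      have hsk : (s, k) ∈ (s, k) :: bs := List.mem_cons_self
      have hk1 : 1 ≤ k := (hgood.1 (s, k) hsk).1
      have hvs : vs = pvBlock (s, k) ++ bs.flatMap pvBlock := by
        rw [← hflat]; simp
      have hs_mem : s ∈ vs := by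
        rw [hvs, pvBlock_cons _ _ hk1]; simp
      have hvlts : v < s := hvlt s hs_mem
      by_cases hsv : s = v + 1
      · have hgrp : pvGrp (v :: vs) = (v, k + 1) :: bs := by simp [pvGrp, hg, hsv]
        rw [hgrp]
        refine ⟨?_, ?_, ?_⟩
        · rw [List.flatMap_cons, pvBlock_cons v (k + 1) (by omega)]
          simp only [Nat.add_sub_cancel]
          rw [hvs, ← hsv]
          simp
        · intro q hq
          rcases List.mem_cons.1 hq with rfl | hq'
          · have := (hgood.1 (s, k) hsk).2
            refine ⟨by omega, ?_⟩
            push_cast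
            push_cast at this
            omega
          · exact hgood.1 q (List.mem_cons_of_mem _ hq')
        · refine List.pairwise_cons.2 ⟨?_, (List.pairwise_cons.1 hgood.2).2⟩
          intro q hq
          have := (List.pairwise_cons.1 hgood.2).1 q hq
          push_cast
          push_cast at this
          omega
      · have hgap : v + 1 < s := by omega
        have hgrp : pvGrp (v :: vs) = (v, 1) :: (s, k) :: bs := by simp [pvGrp, hg, hsv]
        rw [hgrp]
        refine ⟨?_, ?_, ?_⟩
        · rw [List.flatMap_cons, hvs]
          simp [pvBlock]
        · intro q hq
          rcases List.mem_cons.1 hq with rfl | hq'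
          · exact ⟨le_refl 1, by push_cast; omega⟩
          · exact hgood.1 q hq'
        · refine List.pairwise_cons.2 ⟨?_, hgood.2⟩
          intro q hq
          rcases List.mem_cons.1 hq with rfl | hq'
          · push_cast; omega
          · have := (List.pairwise_cons.1 hgood.2).1 q hq'
            have hk1' : (1 : Int) ≤ (k : Int) := by exact_mod_cast hk1
            push_cast
            omega


-- A-side fold over suffix runs ----------------------------------------------

theorem fold_stepA_const {rs : List (List Int)} {b : List Int}
    (h : ∀ r ∈ rs, ¬(2 ≤ r.length ∧ b.length < r.length)) :
    rs.foldl pvStepA b = b := by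
  induction rs with
  | nil => rfl
  | cons r rs ih =>
    have h1 : pvStepA b r = b := by
      unfold pvStepA
      rw [if_neg (h r List.mem_cons_self)]
    rw [List.foldl_cons, h1]
    exact ih (fun r' hr' => h r' (List.mem_cons_of_mem _ hr'))


theorem foldA_block (s : Int) (k : Nat) (b0 : List Int) :
    ((List.range k).map (fun (j : Nat) => pvBlock (s + (j : Int), k - j))).foldl pvStepA b0 =
      pvBStep b0 (s, k) := by
  cases k with
  | zero => simp [pvBStep]
  | succ k' =>
    rw [List.range_succ_eq_map, List.map_cons, List.foldl_cons, List.map_map]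
    have hfirst : pvStepA b0 (pvBlock (s + ((0 : Nat) : Int), k' + 1 - 0)) = pvBStep b0 (s, k' + 1) := by
      unfold pvStepA pvBStep
      rw [pvBlock_length]
      norm_num
    rw [hfirst]
    refine fold_stepA_const ?_
    intro r hr
    obtain ⟨j, hj, rfl⟩ := List.mem_map.1 hr
    have hjlt : j < k' := List.mem_range.1 hj
    simp only [Function.comp_apply, Nat.succ_eq_add_one, pvBlock_length]
    unfold pvBStep
    split_ifs with hc
    · rw [pvBlock_length]; omega
    · omega


theorem foldA_flat : ∀ (bs : List (Int × Nat)), pvGood bs → ∀ b0 : List Int,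
    (bs.flatMap (fun p => (List.range p.2).map (fun (j : Nat) => pvBlock (p.1 + (j : Int), p.2 - j)))).foldl pvStepA b0 =
      bs.foldl pvBStep b0 := by
  intro bs
  induction bs with
  | nil => intro _ b0; rfl
  | cons p bs ih =>
    intro hg b0
    have hgt : pvGood bs :=
      ⟨fun q hq => hg.1 q (List.mem_cons_of_mem _ hq), (List.pairwise_cons.1 hg.2).2⟩
    rw [List.flatMap_cons, List.foldl_append, foldA_block p.1 p.2 b0]
    exact ih hgt _


theorem map_chain_block {bs : List (Int × Nat)} (hg : pvGood bs) {p : Int × Nat} (hp : p ∈ bs) :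
    (pvBlock p).map (pvChain (bs.flatMap pvBlock)) =
      (List.range p.2).map (fun (j : Nat) => pvBlock (p.1 + (j : Int), p.2 - j)) := by
  have h1 : (pvBlock p).map (pvChain (bs.flatMap pvBlock)) =
      (List.range p.2).map (fun (j : Nat) => pvChain (bs.flatMap pvBlock) (p.1 + (j : Int))) := by
    simp [pvBlock, List.map_map, Function.comp]
  rw [h1]
  refine List.map_congr_left (fun j hj => ?_)
  exact pvChain_block hg hp j (List.mem_range.1 hj)


-- B-side scan ----------------------------------------------------------------

theorem pyGet?_neg_one {α : Type} (l : List α) (h : l ≠ []) :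
    PySem.List.pyGet? l (-1) = l.getLast? := by
  have hn : 1 ≤ l.length := List.length_pos_iff.2 h
  unfold PySem.List.pyGet? PySem.List.pyIdx?
  rw [if_neg (by omega), if_pos (by omega)]
  simp only [Option.bind_some]
  rw [List.getLast?_eq_getElem?]
  norm_num


theorem stepB_extend (best cur : List Int) (s : Int) (h : cur ≠ []) (hl : cur.getLast? = some (s - 1)) :
    pvStepB (best, cur) s =
      ((if 2 ≤ cur.length + 1 ∧ best.length < cur.length + 1 then cur ++ [s] else best), cur ++ [s]) := by
  unfold pvStepB
  simp only [if_neg h]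
  rw [pyGet?_neg_one cur h, hl]
  simp [List.length_append]


theorem foldB_run : ∀ (m : Nat) (s : Int) (best cur : List Int), cur ≠ [] →
    cur.getLast? = some (s - 1) →
    (pvBlock (s, m)).foldl pvStepB (best, cur) =
      ((if m = 0 then best
        else if 2 ≤ cur.length + m ∧ best.length < cur.length + m
          then cur ++ pvBlock (s, m) else best),
       cur ++ pvBlock (s, m)) := by
  intro m
  induction m with
  | zero => intro s best cur h hl; simp [pvBlock]
  | succ m ih =>
    intro s best cur h hl
    rw [pvBlock_cons s (m + 1) (by omega)]
    simp only [Nat.add_sub_cancel]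
    rw [List.foldl_cons, stepB_extend best cur s h hl]
    rw [ih (s + 1) _ (cur ++ [s]) (by simp) (by rw [List.getLast?_concat]; congr 1; ring)]
    have hlist : (cur ++ [s]) ++ pvBlock (s + 1, m) = cur ++ (s :: pvBlock (s + 1, m)) := by
      rw [List.append_assoc]; rfl
    have hlen : (cur ++ [s]).length = cur.length + 1 := by simp
    rw [Prod.mk.injEq]
    refine ⟨?_, hlist⟩
    cases m with
    | zero => simp [pvBlock]
    | succ m' =>
      have hm : ¬(m' + 1 + 1 = 0) := by omega
      rw [if_neg (by omega), if_neg hm]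
      by_cases hb1 : 2 ≤ cur.length + 1 ∧ best.length < cur.length + 1
      · rw [if_pos hb1, hlen]
        rw [if_pos (by omega), if_pos (by omega)]
        exact hlist
      · rw [if_neg hb1]
        have hcond : (2 ≤ cur.length + (m' + 1 + 1) ∧ best.length < cur.length + (m' + 1 + 1)) ↔
            (2 ≤ (cur ++ [s]).length + (m' + 1) ∧ best.length < (cur ++ [s]).length + (m' + 1)) := by
          rw [hlen]; omega
        by_cases hc : 2 ≤ cur.length + (m' + 1 + 1) ∧ best.length < cur.length + (m' + 1 + 1)
        · rw [if_pos (hcond.1 hc), if_pos hc]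
          exact hlist
        · rw [if_neg (fun c => hc (hcond.2 c)), if_neg hc]


theorem foldB_block (p : Int × Nat) (hk : 1 ≤ p.2) (best cur : List Int)
    (hcur : cur = [] ∨ ∃ t, cur.getLast? = some t ∧ t + 1 ≠ p.1) :
    (pvBlock p).foldl pvStepB (best, cur) = (pvBStep best p, pvBlock p) := by
  obtain ⟨s, k⟩ := p
  simp only at hk
  have hlist : [s] ++ pvBlock (s + 1, k - 1) = pvBlock (s, k) := by
    rw [pvBlock_cons s k hk]; rfl
  rw [pvBlock_cons s k hk, List.foldl_cons]
  have hstep : pvStepB (best, cur) s = (best, [s]) := by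
    unfold pvStepB
    rcases hcur with rfl | ⟨t, hlast, hne⟩
    · simp
    · have hne' : cur ≠ [] := by
        intro hc; rw [hc] at hlast; simp at hlast
      simp only [if_neg hne']
      rw [pyGet?_neg_one cur hne', hlast]
      simp only [Option.getD_some, if_neg hne]
      simp
  rw [hstep]
  rw [foldB_run (k - 1) (s + 1) best [s] (by simp) (by simp)]
  rw [Prod.mk.injEq]
  refine ⟨?_, rfl⟩
  unfold pvBStep
  cases hk1 : k - 1 with
  | zero =>
    have hk0 : k = 1 := by omega
    subst hk0
    rw [if_pos rfl, if_neg (by omega)]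
  | succ k' =>
    rw [if_neg (by omega)]
    have hc : (2 ≤ ([s] : List Int).length + (k' + 1) ∧ best.length < ([s] : List Int).length + (k' + 1)) ↔
        (2 ≤ k ∧ best.length < k) := by
      simp only [List.length_cons, List.length_nil]
      omega
    split_ifs with h1 h2 h2
    · rw [← hk1]; exact hlist
    · exact absurd (hc.1 h1) h2
    · exact absurd (hc.2 h2) h1
    · rfl


theorem foldB_flat : ∀ (bs : List (Int × Nat)), pvGood bs → ∀ (best cur : List Int),
    (cur = [] ∨ ∃ t, cur.getLast? = some t ∧ ∀ q ∈ bs, t + 1 < q.1) →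
    ((bs.flatMap pvBlock).foldl pvStepB (best, cur)).1 = bs.foldl pvBStep best := by
  intro bs
  induction bs with
  | nil => intro _ best cur _; rfl
  | cons p bs ih =>
    intro hg best cur hcur
    have hk : 1 ≤ p.2 := (hg.1 p List.mem_cons_self).1
    have hgt : pvGood bs :=
      ⟨fun q hq => hg.1 q (List.mem_cons_of_mem _ hq), (List.pairwise_cons.1 hg.2).2⟩
    rw [List.flatMap_cons, List.foldl_append]
    have hcur' : cur = [] ∨ ∃ t, cur.getLast? = some t ∧ t + 1 ≠ p.1 := by
      rcases hcur with rfl | ⟨t, h1, h2⟩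
      · exact Or.inl rfl
      · exact Or.inr ⟨t, h1, by have := h2 p List.mem_cons_self; omega⟩
    rw [foldB_block p hk best cur hcur']
    rw [List.foldl_cons]
    refine ih hgt _ _ (Or.inr ⟨p.1 + ((p.2 : Int) - 1), pvBlock_getLast? p.1 p.2 hk, ?_⟩)
    intro q hq
    have := (List.pairwise_cons.1 hg.2).1 q hq
    omega


theorem pvBFold_pairwise : ∀ (bs : List (Int × Nat)) (b : List Int),
    b.Pairwise (· < ·) → (bs.foldl pvBStep b).Pairwise (· < ·) := by
  intro bs
  induction bs with
  | nil => intro b hb; exact hb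
  | cons p bs ih =>
    intro b hb
    rw [List.foldl_cons]
    refine ih _ ?_
    unfold pvBStep
    split_ifs
    · exact pvBlock_pairwise p
    · exact hb


-- head of the stable reverse length-sort ------------------------------------

theorem insertBy_nil {α : Type} (before : α → α → Bool) (x : α) :
    PySem.List.insertBy before x [] = [x] := by simp [PySem.List.insertBy]

theorem insertBy_cons {α : Type} (before : α → α → Bool) (x y : α) (ys : List α) :
    PySem.List.insertBy before x (y :: ys) =
      if before x y then x :: y :: ys else y :: PySem.List.insertBy before x ys := by
  simp [PySem.List.insertBy]

theorem head?_foldl_insertBy {α : Type} (before : α → α → Bool) :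
    ∀ (rs : List α) (acc : List α) (h0 : α), acc.head? = some h0 →
      (rs.foldl (fun a r => PySem.List.insertBy before r a) acc).head? =
        some (rs.foldl (fun h r => if before r h then r else h) h0) := by
  intro rs
  induction rs with
  | nil => intro acc h0 h; simpa using h
  | cons r rs ih =>
    intro acc h0 h
    obtain ⟨ys, rfl⟩ := List.head?_eq_some_iff.1 h
    rw [List.foldl_cons, List.foldl_cons]
    rw [insertBy_cons]
    by_cases hb : before r h0
    · rw [if_pos hb, if_pos hb]
      exact ih _ _ rfl
    · rw [if_neg hb, if_neg hb]
      exact ih _ _ rfl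


-- output formatting ----------------------------------------------------------

theorem count_flatMap3 (r : List Int) (v : Int) :
    (r.flatMap (fun x => [x, x, x])).count v = 3 * r.count v := by
  induction r with
  | nil => simp
  | cons x r ih =>
    simp only [List.flatMap_cons, List.count_append, List.count_cons, ih]
    by_cases h : x = v
    · subst h; simp; omega
    · simp [h]


theorem flat3_pairwise (r : List Int) (h : r.Pairwise (· < ·)) :
    (r.flatMap (fun x => [x, x, x])).Pairwise (fun a b => a ≤ b) := by
  induction r with
  | nil => simp
  | cons x r ih =>
    have hx : ∀ y ∈ r, x < y := (List.pairwise_cons.1 h).1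
    have ht := ih (List.pairwise_cons.1 h).2
    simp only [List.flatMap_cons]
    have hmem : ∀ y ∈ r.flatMap (fun x => [x, x, x]), x ≤ y := by
      intro y hy
      obtain ⟨z, hz, hy'⟩ := List.mem_flatMap.1 hy
      have : y = z := by simpa using hy'
      subst this
      exact le_of_lt (hx _ hz)
    refine List.pairwise_append.2 ⟨?_, ht, ?_⟩
    · refine List.pairwise_cons.2 ⟨?_, List.pairwise_cons.2 ⟨?_, ?_⟩⟩ <;> simp
    · intro a ha b hb
      have : a = x := by simpa using ha
      subst this
      exact hmem b hb


theorem pyRepeat_three (r : List Int) : PySem.List.pyRepeat r 3 = r ++ (r ++ (r ++ [])) := by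
  show (List.replicate (3 : Int).toNat r).flatten = r ++ (r ++ (r ++ []))
  rfl


theorem sorted_triple (r : List Int) (h : r.Pairwise (· < ·)) :
    PySem.List.sorted (PySem.List.pyRepeat r 3) (fun x => x) false =
      r.flatMap (fun x => [x, x, x]) := by
  rw [pyRepeat_three]
  refine PySem.List.sorted_id_eq_of_perm_of_pairwise _ _ ?_ (flat3_pairwise r h)
  rw [List.perm_iff_count]
  intro a
  rw [count_flatMap3]
  simp [List.count_append]
  omega


-- strict-sorted extensionality ------------------------------------------------

theorem pairwise_lt_of_le_nodup {l : List Int} (hle : l.Pairwise (· ≤ ·)) (hnd : l.Nodup) :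
    l.Pairwise (· < ·) := by
  have h2 := List.Pairwise.and hle (List.nodup_iff_pairwise_ne.1 hnd)
  exact h2.imp (fun h => lt_of_le_of_ne h.1 h.2)


theorem strictExt {l₁ l₂ : List Int} (h₁ : l₁.Pairwise (· < ·)) (h₂ : l₂.Pairwise (· < ·))
    (hm : ∀ x, x ∈ l₁ ↔ x ∈ l₂) : l₁ = l₂ := by
  have hnd₁ : l₁.Nodup := h₁.imp (fun h => ne_of_lt h)
  have hnd₂ : l₂.Nodup := h₂.imp (fun h => ne_of_lt h)
  have hperm : l₁.Perm l₂ := (List.perm_ext_iff_of_nodup hnd₁ hnd₂).2 hm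
  have e1 : PySem.List.sorted l₂ (fun x => x) = l₁ :=
    PySem.List.sorted_eq_of_perm_of_pairwise_lt l₂ l₁ (fun x => x) hperm h₁
  have e2 : PySem.List.sorted l₂ (fun x => x) = l₂ :=
    PySem.List.sorted_eq_self_of_pairwise l₂ (fun x => x) (h₂.imp le_of_lt)
  rw [← e1, e2]


-- assembly lemmas ------------------------------------------------------------

theorem pyGet?_zero_cons {α : Type} (x : α) (ys : List α) :
    PySem.List.pyGet? (x :: ys) 0 = some x := by
  unfold PySem.List.pyGet? PySem.List.pyIdx?
  simp

theorem dedup_loop_eq (cards : List Int) :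
    (cards.foldl (fun acc i => if 3 ≤ PySem.List.count cards i ∧ i ∉ acc then acc ++ [i] else acc) []) =
      PySem.Set.ofList (cards.filter (fun i => decide (3 ≤ PySem.List.count cards i))) := by
  have hstep : (fun (acc : List Int) i => if 3 ≤ PySem.List.count cards i ∧ i ∉ acc then acc ++ [i] else acc) =
      (fun acc i => if 3 ≤ PySem.List.count cards i then PySem.Set.add acc i else acc) := by
    funext acc i
    by_cases h1 : 3 ≤ PySem.List.count cards i
    · by_cases h2 : i ∈ acc
      · rw [if_neg (fun c => c.2 h2), if_pos h1]
        simp [PySem.Set.add, PySem.Set.contains, h2]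
      · rw [if_pos ⟨h1, h2⟩, if_pos h1]
        simp [PySem.Set.add, PySem.Set.contains, h2]
    · rw [if_neg (fun c => h1 c.1), if_neg h1]
  rw [hstep,
    PySem.List.foldl_ite_eq_foldl_filter (fun i => 3 ≤ PySem.List.count cards i) PySem.Set.add cards [],
    ← PySem.Set.ofList_eq_foldl]

theorem stepA_eq : pvStepA = fun b r => if 2 ≤ r.length then (if b.length < r.length then r else b) else b := by
  funext b r
  unfold pvStepA
  by_cases h1 : 2 ≤ r.length
  · by_cases h2 : b.length < r.length
    · rw [if_pos ⟨h1, h2⟩, if_pos h1, if_pos h2]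
    · rw [if_neg (fun c => h2 c.2), if_pos h1, if_neg h2]
  · rw [if_neg (fun c => h1 c.1), if_neg h1]

theorem sel_fold (l : List Int) (c : Int → List Int) :
    (l.map c).foldl pvStepA [] =
      ((l.filter (fun i => decide (2 ≤ (c i).length))).map c).foldl
        (fun b r => if b.length < r.length then r else b) ([] : List Int) := by
  rw [stepA_eq,
    PySem.List.foldl_ite_eq_foldl_filter (fun r => 2 ≤ r.length)
      (fun (b r : List Int) => if b.length < r.length then r else b) (l.map c) []]
  congr 1
  rw [List.filter_map]
  rfl

theorem sel_head (rs : List (List Int)) (h2 : ∀ r ∈ rs, 2 ≤ r.length) (hne : rs ≠ []) :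
    (PySem.List.pyGet? (PySem.List.sorted rs (fun x => x.length) true) 0).getD [] =
      rs.foldl (fun b r => if b.length < r.length then r else b) ([] : List Int) := by
  obtain ⟨r0, rest, rfl⟩ : ∃ a t, rs = a :: t := by
    cases rs with
    | nil => exact absurd rfl hne
    | cons a t => exact ⟨a, t, rfl⟩
  rw [PySem.List.sorted_rev_eq_foldl_insertBy]
  rw [List.foldl_cons, insertBy_nil]
  have hh := head?_foldl_insertBy
    (fun (a b : List Int) => decide (b.length < a.length)) rest [r0] r0 rfl
  obtain ⟨ys, hys⟩ := List.head?_eq_some_iff.1 hh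
  rw [hys, pyGet?_zero_cons, Option.getD_some, List.foldl_cons]
  have h0 : (if ([] : List Int).length < r0.length then r0 else ([] : List Int)) = r0 := by
    rw [if_pos]
    have := h2 r0 List.mem_cons_self
    simp only [List.length_nil]
    omega
  rw [h0]
  show rest.foldl (fun h r => if decide (h.length < r.length) = true then r else h) r0 =
    rest.foldl (fun b r => if b.length < r.length then r else b) r0
  exact PySem.List.foldl_congr_mem rest _ _ r0 (fun acc x _ => by simp)

theorem mainA (vals : List Int) (hpw : vals.Pairwise (· < ·)) (h15 : ∀ x ∈ vals, x < 15) :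
    (vals.map (pvChain vals)).foldl pvStepA [] = pvBFold (pvGrp vals) := by
  obtain ⟨hflat, hgood⟩ := pvGrp_spec vals hpw h15
  conv_lhs => rw [← hflat]
  rw [List.map_flatMap]
  rw [List.flatMap_congr (fun p hp => map_chain_block hgood hp)]
  rw [foldA_flat _ hgood]
  rfl

theorem mainB (vals : List Int) (hpw : vals.Pairwise (· < ·)) (h15 : ∀ x ∈ vals, x < 15) :
    (vals.foldl pvStepB (([] : List Int), ([] : List Int))).1 = pvBFold (pvGrp vals) := by
  obtain ⟨hflat, hgood⟩ := pvGrp_spec vals hpw h15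
  conv_lhs => rw [← hflat]
  exact foldB_flat _ hgood [] [] (Or.inl rfl)

-- ===== VERDICT (by name: the statement is the Claim_ definition above) =====
theorem find_3_l_d_spec : Claim_equal_find_3_l_d := by
  intro cards _
  show find_3_l_d cards = find_3_l_d_alt cards
  unfold find_3_l_d find_3_l_d_alt
  simp only []
  rw [dedup_loop_eq cards, ← PySem.Dict.counter_eq_foldl, PySem.Dict.keys_counter]
  have hBf : (PySem.Set.ofList cards).filter
        (fun v => decide (3 ≤ (PySem.Dict.counter cards).getD v 0) && decide (v < 15)) =
      (PySem.Set.ofList cards).filter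
        (fun v => decide (3 ≤ PySem.List.count cards v) && decide (v < 15)) := by
    refine List.filter_congr ?_
    intro v _
    congr 1
    rw [decide_eq_decide, PySem.Dict.getD_counter, PySem.List.count_eq]
    exact_mod_cast Iff.rfl
  rw [hBf]
  set vals := PySem.List.sorted
      ((PySem.Set.ofList cards).filter
        (fun v => decide (3 ≤ PySem.List.count cards v) && decide (v < 15))) (fun x => x) false with hvals
  set t3s := PySem.List.sorted
      (PySem.Set.ofList (cards.filter (fun i => decide (3 ≤ PySem.List.count cards i)))) (fun x => x) false with ht3s
  have hvnd : vals.Nodup := by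
    rw [hvals]
    exact ((PySem.List.sorted_perm _ _ _).symm).nodup ((PySem.Set.nodup_ofList cards).filter _)
  have hvpw : vals.Pairwise (· < ·) :=
    pairwise_lt_of_le_nodup (by rw [hvals]; exact PySem.List.sorted_pairwise _ _) hvnd
  have hvmem : ∀ x, x ∈ vals ↔ (x ∈ cards ∧ 3 ≤ PySem.List.count cards x ∧ x < 15) := by
    intro x
    rw [hvals, PySem.List.mem_sorted, List.mem_filter, PySem.Set.mem_ofList]
    simp
  have hv15 : ∀ x ∈ vals, x < 15 := fun x hx => ((hvmem x).1 hx).2.2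
  have ht3pw : t3s.Pairwise (· < ·) := by
    rw [ht3s]; exact PySem.List.sorted_ofList_pairwise_lt _
  have ht3mem : ∀ x, x ∈ t3s ↔ (x ∈ cards ∧ 3 ≤ PySem.List.count cards x) := by
    intro x
    rw [ht3s, PySem.List.mem_sorted, PySem.Set.mem_ofList, List.mem_filter]
    simp
  have hcc : ∀ num, pvChain t3s num = pvChain vals num := by
    refine pvChain_congr t3s vals (fun x => ?_)
    rw [ht3mem, hvmem]
    constructor
    · rintro ⟨⟨h1, h2⟩, h3⟩; exact ⟨⟨h1, h2, h3⟩, h3⟩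
    · rintro ⟨⟨h1, h2, _⟩, h3⟩; exact ⟨⟨h1, h2⟩, h3⟩
  have hfv : t3s.filter (fun i => decide (i < 15)) = vals := by
    refine strictExt (ht3pw.filter _) hvpw (fun x => ?_)
    rw [List.mem_filter, ht3mem, hvmem]
    simp [and_assoc]
  rw [PySem.List.foldl_append_ite (fun i => 2 ≤ (pvChain t3s i).length) (fun i => pvChain t3s i) t3s []]
  simp only [List.nil_append]
  simp only [hcc]
  have hfil : t3s.filter (fun i => decide (2 ≤ (pvChain vals i).length)) =
      vals.filter (fun i => decide (2 ≤ (pvChain vals i).length)) := by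
    have h1 : t3s.filter (fun i => decide (2 ≤ (pvChain vals i).length)) =
        t3s.filter (fun i => decide (2 ≤ (pvChain vals i).length) && decide (i < 15)) := by
      refine List.filter_congr (fun i _ => ?_)
      by_cases h15 : i < 15
      · simp [h15]
      · have hce : pvChain vals i = [] := pvChain_neg (fun c => h15 c.2)
        simp [hce, h15]
    rw [h1, ← List.filter_filter, hfv]
  rw [hfil]
  set RUNS := (vals.filter (fun i => decide (2 ≤ (pvChain vals i).length))).map (pvChain vals) with hruns
  have hFB : (List.foldl pvStepB ([], []) vals).1 = pvBFold (pvGrp vals) := mainB vals hvpw hv15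
  have hFA : (vals.map (pvChain vals)).foldl pvStepA [] = pvBFold (pvGrp vals) := mainA vals hvpw hv15
  have hSf : (vals.map (pvChain vals)).foldl pvStepA [] =
      RUNS.foldl (fun b r => if b.length < r.length then r else b) [] := sel_fold vals (pvChain vals)
  by_cases hre : RUNS = []
  · rw [if_pos hre]
    have hempty : pvBFold (pvGrp vals) = [] := by rw [← hFA, hSf, hre]; rfl
    rw [hFB, hempty]
    rfl
  · rw [if_neg hre]
    have h2r : ∀ r ∈ RUNS, 2 ≤ r.length := by
      intro r hr
      obtain ⟨i, hi, rfl⟩ := List.mem_map.1 hr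
      have := (List.mem_filter.1 hi).2
      simpa using this
    rw [sel_head RUNS h2r hre, ← hSf, hFA, hFB]
    congr 1
    exact sorted_triple _ (pvBFold_pairwise _ [] List.Pairwise.nil)
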